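-- pv_equiv track=rewrite | github.com/NISH1001/guide2datamining | ch2-collaborative-filtering/dsutils.py | convert_to_sparse
-- ===== SOURCE A (Python) =====
-- import collections
--
-- def sort_dict(d):
--     """
--         Sort the dict by keys
--     """
--     res = {}
--     od = collections.OrderedDict(sorted(d.items()))
--     return dict(od)
--
-- def convert_to_sparse(dict1, dict2):
--     """
--         Convert the dict to sparse.
--         Each returned dicitonary contains null/0 values for the keys that
--         are only found in the other dict
--     """
--     for key in dict2:
--         if key not in dict1:
--             dict1[key] = 0
--
--     for key in dict1:
--         if key not in dict2:
--             dict2[key] = 0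
--     dict1 = sort_dict(dict1)
--     dict2 = sort_dict(dict2)
--     return dict1, dict2
-- ===== SOURCE B (Python) =====
-- def convert_to_sparse(dict1, dict2):
--     # Merge-based rewrite: sort each dict's keys once, then walk both sorted key
--     # lists with two pointers, emitting each union key in order with a 0-default
--     # lookup into each dict.  (Returns fresh dicts; unlike A it does not mutate
--     # its arguments -- the equivalence claimed is about the return value only.)
--     ks1 = sorted(dict1)
--     ks2 = sorted(dict2)
--     out1 = {}
--     out2 = {}
--     i = j = 0
--     while i < len(ks1) or j < len(ks2):
--         if j == len(ks2) or (i < len(ks1) and ks1[i] <= ks2[j]):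
--             k = ks1[i]
--             i += 1
--             if j < len(ks2) and ks2[j] == k:
--                 j += 1
--         else:
--             k = ks2[j]
--             j += 1
--         out1[k] = dict1.get(k, 0)
--         out2[k] = dict2.get(k, 0)
--     return out1, out2
-- ===== Notes on version B (the rewrite author's own statement) =====
-- stated objective: alternative
-- what changed: Instead of filling each dict with the other's missing keys and then sorting the items, B sorts the two key lists once and does a two-pointer merge over them, emitting each union key in order with a get(key, 0) lookup into each original dict; it builds fresh output dicts and never mutates or fills the inputs (A mutates its arguments in place; the equivalence is about the return value).
import Mathlib
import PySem

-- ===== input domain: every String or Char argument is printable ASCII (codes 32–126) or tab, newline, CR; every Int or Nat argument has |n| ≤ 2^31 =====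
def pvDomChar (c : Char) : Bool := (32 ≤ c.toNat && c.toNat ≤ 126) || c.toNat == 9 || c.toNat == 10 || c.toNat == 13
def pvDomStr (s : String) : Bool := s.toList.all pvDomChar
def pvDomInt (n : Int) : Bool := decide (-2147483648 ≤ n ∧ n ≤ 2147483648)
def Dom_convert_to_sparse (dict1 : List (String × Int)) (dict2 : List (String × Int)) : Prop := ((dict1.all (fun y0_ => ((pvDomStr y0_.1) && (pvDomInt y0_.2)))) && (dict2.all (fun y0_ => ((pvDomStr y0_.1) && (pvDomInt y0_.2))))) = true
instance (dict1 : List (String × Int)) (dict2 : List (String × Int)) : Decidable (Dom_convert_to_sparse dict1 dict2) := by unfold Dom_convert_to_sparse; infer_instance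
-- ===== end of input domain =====

-- B replaces A's fill-the-dicts-then-sort scheme by a two-pointer merge of the two sorted key
-- lists with get(key, 0) lookups (objective: alternative algorithm). The equivalence is about
-- the RETURN value only: the Python A mutates its dict arguments in place, B does not.

-- ===== PORT A =====
def pv_sort_dict (d : PySem.Dict String Int) : List (String × Int) :=
  PySem.List.sorted2 d.items (fun p => p.1) (fun p => p.2)

def convert_to_sparse (dict1 : List (String × Int)) (dict2 : List (String × Int)) : (List (String × Int)) × (List (String × Int)) :=
  let d1 := PySem.Dict.mk dict1
  let d2 := PySem.Dict.mk dict2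
  -- for key in dict2: if key not in dict1: dict1[key] = 0
  let d1 := (PySem.Dict.keys d2).foldl (fun d key => if !(d.contains key) then d.insert key 0 else d) d1
  -- for key in dict1: if key not in dict2: dict2[key] = 0
  let d2 := (PySem.Dict.keys d1).foldl (fun d key => if !(d.contains key) then d.insert key 0 else d) d2
  (pv_sort_dict d1, pv_sort_dict d2)

-- ===== PORT B =====
-- Source B's while loop over the two sorted key lists, transcribed as structural recursion on the
-- unread remainders of ks1 / ks2 (the two index pointers i, j); each iteration emits one union
-- key k together with dict1.get(k, 0) and dict2.get(k, 0).
def pvMerge (d1 d2 : PySem.Dict String Int) : List String → List String → List (String × Int) × List (String × Int)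
  | [], [] => ([], [])
  | x :: t1, [] =>
      let r := pvMerge d1 d2 t1 []
      ((x, d1.getD x 0) :: r.1, (x, d2.getD x 0) :: r.2)
  | [], y :: t2 =>
      let r := pvMerge d1 d2 [] t2
      ((y, d1.getD y 0) :: r.1, (y, d2.getD y 0) :: r.2)
  | x :: t1, y :: t2 =>
      if x ≤ y then
        let r := pvMerge d1 d2 t1 (if y = x then t2 else y :: t2)
        ((x, d1.getD x 0) :: r.1, (x, d2.getD x 0) :: r.2)
      else
        let r := pvMerge d1 d2 (x :: t1) t2
        ((y, d1.getD y 0) :: r.1, (y, d2.getD y 0) :: r.2)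
termination_by l1 l2 => l1.length + l2.length
decreasing_by all_goals (try split) <;> simp <;> omega

def convert_to_sparse_alt (dict1 : List (String × Int)) (dict2 : List (String × Int)) : (List (String × Int)) × (List (String × Int)) :=
  let d1 := PySem.Dict.mk dict1
  let d2 := PySem.Dict.mk dict2
  let ks1 := PySem.List.sorted d1.keys (fun k => k)   -- ks1 = sorted(dict1)
  let ks2 := PySem.List.sorted d2.keys (fun k => k)   -- ks2 = sorted(dict2)
  pvMerge d1 d2 ks1 ks2

-- ===== PRECONDITION & SPEC =====
-- Pre_ excludes association lists with duplicate keys: they encode no Python dict (a Python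
-- dict's keys are unique), so neither program is ever run on them.
def Pre_convert_to_sparse (dict1 : List (String × Int)) (dict2 : List (String × Int)) : Prop :=
  (dict1.map Prod.fst).Nodup ∧ (dict2.map Prod.fst).Nodup
instance (dict1 : List (String × Int)) (dict2 : List (String × Int)) : Decidable (Pre_convert_to_sparse dict1 dict2) := by unfold Pre_convert_to_sparse; infer_instance
def pvWitness_convert_to_sparse : (List (String × Int)) × (List (String × Int)) := ([("a", 1)], [("b", 2)])

def Spec_convert_to_sparse (dict1 : List (String × Int)) (dict2 : List (String × Int)) (out : (List (String × Int)) × (List (String × Int))) : Prop := out = convert_to_sparse_alt dict1 dict2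
instance (dict1 : List (String × Int)) (dict2 : List (String × Int)) (out : (List (String × Int)) × (List (String × Int))) : Decidable (Spec_convert_to_sparse dict1 dict2 out) := by unfold Spec_convert_to_sparse; infer_instance

-- ===== CLAIM (what is proved, stated in full; the proofs are below) =====
def Claim_equal_convert_to_sparse : Prop := ∀ (dict1 : List (String × Int)) (dict2 : List (String × Int)), Dom_convert_to_sparse dict1 dict2 → Pre_convert_to_sparse dict1 dict2 → Spec_convert_to_sparse dict1 dict2 (convert_to_sparse dict1 dict2)

-- ===== LEMMAS AND PROOFS =====

-- ---- B side: pvMerge is the map of the merged key list ----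

-- the key sequence pvMerge walks (proof-side companion of pvMerge)
def pvMergeKeys : List String → List String → List String
  | [], [] => []
  | x :: t1, [] => x :: pvMergeKeys t1 []
  | [], y :: t2 => y :: pvMergeKeys [] t2
  | x :: t1, y :: t2 =>
      if x ≤ y then x :: pvMergeKeys t1 (if y = x then t2 else y :: t2)
      else y :: pvMergeKeys (x :: t1) t2
termination_by l1 l2 => l1.length + l2.length
decreasing_by all_goals (try split) <;> simp <;> omega

theorem pvMerge_eq (d1 d2 : PySem.Dict String Int) (l1 l2 : List String) :
    pvMerge d1 d2 l1 l2 =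
      ((pvMergeKeys l1 l2).map (fun k => (k, d1.getD k 0)),
       (pvMergeKeys l1 l2).map (fun k => (k, d2.getD k 0))) := by
  fun_induction pvMergeKeys l1 l2 <;>
    simp_all [pvMerge]

theorem mem_pvMergeKeys (l1 l2 : List String) (x : String) :
    x ∈ pvMergeKeys l1 l2 ↔ x ∈ l1 ∨ x ∈ l2 := by
  fun_induction pvMergeKeys l1 l2 with
  | case1 => simp
  | case2 a t1 ih => simp_all
  | case3 b t2 ih => simp_all
  | case4 a t1 b t2 hab ih =>
    by_cases hba : b = a <;> simp_all <;> tauto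
  | case5 a t1 b t2 hab ih => simp_all; tauto

theorem pairwise_pvMergeKeys (l1 l2 : List String)
    (h1 : l1.Pairwise (fun a b => a < b)) (h2 : l2.Pairwise (fun a b => a < b)) :
    (pvMergeKeys l1 l2).Pairwise (fun a b => a < b) := by
  fun_induction pvMergeKeys l1 l2 with
  | case1 => simp
  | case2 a t1 ih =>
    rcases List.pairwise_cons.mp h1 with ⟨ha1, h1'⟩
    refine List.pairwise_cons.mpr ⟨fun z hz => ?_, ih h1' h2⟩
    exact ha1 z (((mem_pvMergeKeys t1 [] z).mp hz).resolve_right (by simp))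
  | case3 b t2 ih =>
    rcases List.pairwise_cons.mp h2 with ⟨hb2, h2'⟩
    refine List.pairwise_cons.mpr ⟨fun z hz => ?_, ih h1 h2'⟩
    exact hb2 z (((mem_pvMergeKeys [] t2 z).mp hz).resolve_left (by simp))
  | case4 a t1 b t2 hab ih =>
    rcases List.pairwise_cons.mp h1 with ⟨ha1, h1'⟩
    rcases List.pairwise_cons.mp h2 with ⟨hb2, h2'⟩
    by_cases hba : b = a
    · have harg : (if h : b = a then t2 else b :: t2) = t2 := by simp [hba]
      have hgoal : (if b = a then t2 else b :: t2) = t2 := by simp [hba]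
      rw [harg] at ih
      rw [hgoal]
      refine List.pairwise_cons.mpr ⟨fun z hz => ?_, ih h1' h2'⟩
      rcases (mem_pvMergeKeys _ _ z).mp hz with hz | hz
      · exact ha1 z hz
      · exact hba ▸ hb2 z hz
    · have harg : (if h : b = a then t2 else b :: t2) = b :: t2 := by simp [hba]
      have hgoal : (if b = a then t2 else b :: t2) = b :: t2 := by simp [hba]
      rw [harg] at ih
      rw [hgoal]
      refine List.pairwise_cons.mpr
        ⟨fun z hz => ?_, ih h1' (List.pairwise_cons.mpr ⟨hb2, h2'⟩)⟩
      rcases (mem_pvMergeKeys _ _ z).mp hz with hz | hz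
      · exact ha1 z hz
      · rcases List.mem_cons.mp hz with hz | hz
        · exact hz ▸ lt_of_le_of_ne hab (fun h => hba h.symm)
        · exact lt_of_le_of_lt hab (hb2 z hz)
  | case5 a t1 b t2 hab ih =>
    rcases List.pairwise_cons.mp h1 with ⟨ha1, h1'⟩
    rcases List.pairwise_cons.mp h2 with ⟨hb2, h2'⟩
    have hba : b < a := not_le.mp hab
    refine List.pairwise_cons.mpr
      ⟨fun z hz => ?_, ih (List.pairwise_cons.mpr ⟨ha1, h1'⟩) h2'⟩
    rcases (mem_pvMergeKeys _ _ z).mp hz with hz | hz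
    · rcases List.mem_cons.mp hz with hz | hz
      · exact hz ▸ hba
      · exact lt_trans hba (ha1 z hz)
    · exact hb2 z hz

-- ---- A side: the fill loops ----

-- A's "if key not in d: d[key] = 0" is d.setdefault(key, 0)
def pvStep (d : PySem.Dict String Int) (k : String) : PySem.Dict String Int :=
  PySem.Dict.setdefault d k 0

theorem pvStep_eq_ite (d : PySem.Dict String Int) (k : String) :
    (if !(d.contains k) then d.insert k 0 else d) = pvStep d k := by
  unfold pvStep
  cases h : d.contains k with
  | true => simp [PySem.Dict.setdefault_of_contains d 0 h]
  | false => simp [PySem.Dict.setdefault_of_not_contains d 0 h]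

-- filling with the default 0 never changes a 0-default lookup
theorem pvStep_getD (d : PySem.Dict String Int) (k' k : String) :
    (pvStep d k').getD k 0 = d.getD k 0 := by
  unfold pvStep
  by_cases hk : k = k'
  · subst hk
    rw [PySem.Dict.getD_setdefault_self]
  · cases h : d.contains k' with
    | true => rw [PySem.Dict.setdefault_of_contains d 0 h]
    | false =>
      rw [PySem.Dict.setdefault_of_not_contains d 0 h, PySem.Dict.getD_insert, if_neg hk]

theorem pvFoldl_getD (l : List String) (d : PySem.Dict String Int) (k : String) :
    (l.foldl pvStep d).getD k 0 = d.getD k 0 := by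
  induction l generalizing d with
  | nil => rfl
  | cons x t ih => rw [List.foldl_cons, ih, pvStep_getD]

theorem pvStep_keys (d : PySem.Dict String Int) (k : String) :
    (pvStep d k).keys = PySem.Set.add d.keys k := by
  unfold pvStep
  rw [PySem.Dict.keys_setdefault, PySem.Set.add_eq_ite,
    PySem.Dict.contains_eq_decide_mem_keys]
  by_cases h : k ∈ d.keys <;> simp [h]

theorem pvFoldl_keys (l : List String) (d : PySem.Dict String Int) :
    (l.foldl pvStep d).keys = PySem.Set.update d.keys l := by
  induction l generalizing d with
  | nil => rfl
  | cons x t ih =>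
    show ((t.foldl pvStep (pvStep d x))).keys = PySem.Set.update (PySem.Set.add d.keys x) t
    rw [ih (pvStep d x), pvStep_keys]

-- ---- sorted(d.items()): with distinct first components the tuple sort is the key sort ----

theorem pvInsertBy_congr {α : Type} (p q : α → α → Bool) (x : α) (l : List α)
    (h : ∀ y ∈ l, p x y = q x y) : PySem.List.insertBy p x l = PySem.List.insertBy q x l := by
  induction l with
  | nil => rfl
  | cons y ys ih =>
    rw [PySem.List.insertBy, PySem.List.insertBy, h y (List.mem_cons_self),
      ih (fun z hz => h z (List.mem_cons_of_mem _ hz))]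

theorem pvFoldl_insertBy_congr {α : Type} (p q : α → α → Bool) (xs acc : List α)
    (h : ∀ a ∈ xs, ∀ b, b ∈ xs ∨ b ∈ acc → p a b = q a b) :
    xs.foldl (fun a x => PySem.List.insertBy p x a) acc
      = xs.foldl (fun a x => PySem.List.insertBy q x a) acc := by
  induction xs generalizing acc with
  | nil => rfl
  | cons x t ih =>
    rw [List.foldl_cons, List.foldl_cons,
      pvInsertBy_congr p q x acc
        (fun y hy => h x List.mem_cons_self y (Or.inr hy))]
    refine ih _ (fun a ha b hb => ?_)
    refine h a (List.mem_cons_of_mem _ ha) b ?_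
    rcases hb with hb | hb
    · exact Or.inl (List.mem_cons_of_mem _ hb)
    · rcases (PySem.List.mem_insertBy _ _ _ _).mp hb with hb | hb
      · exact Or.inl (hb ▸ List.mem_cons_self)
      · exact Or.inr hb
    
theorem pvSorted2_eq_sorted (xs : List (String × Int))
    (h : ∀ a ∈ xs, ∀ b ∈ xs, a.1 = b.1 → a = b) :
    PySem.List.sorted2 xs (fun p => p.1) (fun p => p.2)
      = PySem.List.sorted xs (fun p => p.1) := by
  show xs.foldl (fun a x => PySem.List.insertBy _ x a) []
      = PySem.List.sorted xs (fun p => p.1)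
  rw [PySem.List.sorted_eq_foldl_insertBy]
  refine pvFoldl_insertBy_congr _ _ xs [] (fun a ha b hb => ?_)
  rcases hb with hb | hb
  · by_cases h1 : a.1 < b.1
    · simp [h1]
    · by_cases h2 : b.1 < a.1
      · simp [h1, h2]
      · have hab : a = b := h a ha b hb (le_antisymm (not_lt.mp h2) (not_lt.mp h1))
        subst hab
        simp
  · cases hb

-- ---- the common shape of A's two results ----

theorem pvSortFold (d : PySem.Dict String Int) (l : List String) (hnd : d.keys.Nodup)
    (U : List String) (hU : U.Pairwise (fun a b => a < b))
    (hmemU : ∀ x, x ∈ U ↔ x ∈ PySem.Set.update d.keys l) :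
    pv_sort_dict (l.foldl pvStep d) = U.map (fun k => (k, d.getD k 0)) := by
  have hkeys : (l.foldl pvStep d).keys = PySem.Set.update d.keys l := pvFoldl_keys l d
  have hnd' : (l.foldl pvStep d).keys.Nodup := hkeys ▸ PySem.Set.nodup_update d.keys l hnd
  have hitems : (l.foldl pvStep d).items
      = (PySem.Set.update d.keys l).map (fun k => (k, d.getD k 0)) := by
    rw [PySem.Dict.items_eq_map_keys _ hnd' 0, hkeys]
    exact List.map_congr_left (fun k _ => by rw [pvFoldl_getD])
  have hinj : ∀ a ∈ (l.foldl pvStep d).items, ∀ b ∈ (l.foldl pvStep d).items,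
      a.1 = b.1 → a = b := by
    intro a ha b hb hab
    rw [hitems] at ha hb
    obtain ⟨ka, _, rfl⟩ := List.mem_map.mp ha
    obtain ⟨kb, _, rfl⟩ := List.mem_map.mp hb
    simp only at hab
    rw [hab]
  have hperm : (U.map (fun k => (k, d.getD k 0))).Perm (l.foldl pvStep d).items := by
    rw [hitems]
    refine List.Perm.map _ ?_
    refine (List.perm_ext_iff_of_nodup (List.Pairwise.imp ne_of_lt hU)
      (PySem.Set.nodup_update d.keys l hnd)).mpr hmemU
  have hpw : (U.map (fun k => (k, d.getD k 0))).Pairwise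
      (fun a b => (a.1 : String) < b.1) := by
    rw [List.pairwise_map]
    exact hU
  unfold pv_sort_dict
  rw [pvSorted2_eq_sorted _ hinj]
  exact PySem.List.sorted_eq_of_perm_of_pairwise_lt _ _ _ hperm hpw

-- strictly increasing version of a sorted nodup key list
theorem pvSorted_pairwise_lt (K : List String) (h : K.Nodup) :
    (PySem.List.sorted K (fun k => k)).Pairwise (fun a b => a < b) := by
  have hle := PySem.List.sorted_pairwise K (fun k => k)
  have hnd : (PySem.List.sorted K (fun k => k)).Nodup :=
    (PySem.List.sorted_perm K (fun k => k) false).nodup_iff.mpr h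
  exact (hle.and hnd).imp (fun h => lt_of_le_of_ne h.1 h.2)

-- ===== VERDICT (by name: the statement is the Claim_ definition above) =====
theorem convert_to_sparse_spec : Claim_equal_convert_to_sparse := by
  intro dict1 dict2 _ hpre
  obtain ⟨h1, h2⟩ := hpre
  show convert_to_sparse dict1 dict2 = convert_to_sparse_alt dict1 dict2
  have hstep : (fun (d : PySem.Dict String Int) (key : String) =>
      if !(d.contains key) then d.insert key 0 else d) = pvStep :=
    funext fun d => funext fun k => pvStep_eq_ite d k
  have hA : convert_to_sparse dict1 dict2 =
      (pv_sort_dict ((PySem.Dict.keys (PySem.Dict.mk dict2)).foldl pvStep (PySem.Dict.mk dict1)),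
       pv_sort_dict ((PySem.Dict.keys ((PySem.Dict.keys (PySem.Dict.mk dict2)).foldl pvStep
          (PySem.Dict.mk dict1))).foldl pvStep (PySem.Dict.mk dict2))) := by
    simp only [convert_to_sparse, hstep]
  have hB : convert_to_sparse_alt dict1 dict2 =
      pvMerge (PySem.Dict.mk dict1) (PySem.Dict.mk dict2)
        (PySem.List.sorted (PySem.Dict.mk dict1).keys (fun k => k))
        (PySem.List.sorted (PySem.Dict.mk dict2).keys (fun k => k)) := rfl
  rw [hA, hB, pvMerge_eq]
  have hk1 : (PySem.Dict.mk dict1).keys = dict1.map Prod.fst := PySem.Dict.keys_mk dict1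
  have hk2 : (PySem.Dict.mk dict2).keys = dict2.map Prod.fst := PySem.Dict.keys_mk dict2
  have hnd1 : (PySem.Dict.mk dict1).keys.Nodup := hk1 ▸ h1
  have hnd2 : (PySem.Dict.mk dict2).keys.Nodup := hk2 ▸ h2
  have hU : (pvMergeKeys (PySem.List.sorted (PySem.Dict.mk dict1).keys (fun k => k))
      (PySem.List.sorted (PySem.Dict.mk dict2).keys (fun k => k))).Pairwise
      (fun a b => a < b) :=
    pairwise_pvMergeKeys _ _ (pvSorted_pairwise_lt _ hnd1) (pvSorted_pairwise_lt _ hnd2)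
  have hmemU : ∀ x, x ∈ pvMergeKeys (PySem.List.sorted (PySem.Dict.mk dict1).keys (fun k => k))
      (PySem.List.sorted (PySem.Dict.mk dict2).keys (fun k => k))
      ↔ x ∈ (PySem.Dict.mk dict1).keys ∨ x ∈ (PySem.Dict.mk dict2).keys := by
    intro x
    rw [mem_pvMergeKeys, PySem.List.mem_sorted, PySem.List.mem_sorted]
  refine Prod.ext ?_ ?_
  · -- first component
    exact pvSortFold (PySem.Dict.mk dict1) (PySem.Dict.mk dict2).keys hnd1 _ hU
      (fun x => by rw [hmemU x, PySem.Set.mem_update])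
  · -- second component: the second loop runs over the filled first dict's keys
    show pv_sort_dict _ = _
    rw [pvFoldl_keys]
    exact pvSortFold (PySem.Dict.mk dict2) _ hnd2 _ hU
      (fun x => by
        rw [hmemU x, PySem.Set.mem_update, PySem.Set.mem_update]
        tauto)
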